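-- pv_equiv track=rewrite | github.com/Benbok/pediatrics | scripts/enrich_pediatric_dosing_safe.py | pick_form_id
-- ===== SOURCE A (Python) =====
-- def pick_form_id(forms):
--     if not forms:
--         return None
--     # Prefer oral pediatric-friendly forms first.
--     preferred = ("drops", "syrup", "suspension", "solution", "tablet", "capsule")
--     for p in preferred:
--         for f in forms:
--             if f.get("type") == p and f.get("id"):
--                 return f.get("id")
--     return forms[0].get("id")
-- ===== SOURCE B (Python) =====
-- def pick_form_id(forms):
--     if not forms:
--         return None
--     prio = {"drops": 0, "syrup": 1, "suspension": 2,
--             "solution": 3, "tablet": 4, "capsule": 5}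
--     best = None  # (priority, id) of best preferred form seen so far
--     for f in forms:
--         i = f.get("id")
--         if not i:
--             continue
--         p = prio.get(f.get("type"))
--         if p is not None and (best is None or p < best[0]):
--             best = (p, i)
--     return best[1] if best is not None else forms[0].get("id")
-- ===== Notes on version B (the rewrite author's own statement) =====
-- stated objective: alternative
-- what changed: Replaced A's six passes over forms (one per preferred type, earliest match returned) by a single pass over forms that keeps the minimum-priority truthy-id form via a priority dict, ties broken toward the earliest form.
import Mathlib
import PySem

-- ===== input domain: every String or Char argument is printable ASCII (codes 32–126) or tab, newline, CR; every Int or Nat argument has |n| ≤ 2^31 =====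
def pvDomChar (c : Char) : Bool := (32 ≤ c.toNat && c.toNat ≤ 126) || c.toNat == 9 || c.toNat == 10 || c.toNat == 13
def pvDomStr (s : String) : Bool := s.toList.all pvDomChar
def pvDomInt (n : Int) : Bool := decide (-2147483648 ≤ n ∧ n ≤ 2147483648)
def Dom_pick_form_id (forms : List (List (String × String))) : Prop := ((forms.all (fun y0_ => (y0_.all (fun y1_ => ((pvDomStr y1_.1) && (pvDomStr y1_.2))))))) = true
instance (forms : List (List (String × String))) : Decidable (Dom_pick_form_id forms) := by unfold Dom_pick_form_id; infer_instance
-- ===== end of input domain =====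

-- B replaces A's six passes over forms (one per preferred type) by a single pass
-- keeping the minimum-priority form via a priority dict (alternative decomposition; same return value).

-- ===== PORT A =====
def preferredA : List String := ["drops", "syrup", "suspension", "solution", "tablet", "capsule"]

def truthyA : Option String → Bool
  | none => false
  | some s => !(s == "")

def pickA_inner (p : String) : List (List (String × String)) → Option String
  | [] => none
  | f :: rest =>
    if (PySem.Dict.mk f).get? "type" = some p ∧ truthyA ((PySem.Dict.mk f).get? "id")
    then (PySem.Dict.mk f).get? "id"
    else pickA_inner p rest

def pickA_outer (forms : List (List (String × String))) : List String → Option String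
  | [] => none
  | p :: ps =>
    match pickA_inner p forms with
    | some i => some i
    | none => pickA_outer forms ps

def pick_form_id (forms : List (List (String × String))) : Option String :=
  match forms with
  | [] => none
  | f0 :: _ =>
    match pickA_outer forms preferredA with
    | some i => some i
    | none => (PySem.Dict.mk f0).get? "id"

-- ===== PORT B =====
def prioB : PySem.Dict String Int :=
  PySem.Dict.mk [("drops", 0), ("syrup", 1), ("suspension", 2), ("solution", 3), ("tablet", 4), ("capsule", 5)]

def pickB_loop : List (List (String × String)) → Option (Int × String) → Option (Int × String)
  | [], best => best
  | f :: rest, best =>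
    match (PySem.Dict.mk f).get? "id" with
    | none => pickB_loop rest best                    -- i falsy (missing): continue
    | some i =>
      if i = "" then pickB_loop rest best             -- i falsy (empty): continue
      else
        match (PySem.Dict.mk f).get? "type" with
        | none => pickB_loop rest best                -- prio.get(None) is None
        | some t =>
          match prioB.get? t with
          | none => pickB_loop rest best              -- p is None
          | some p =>
            match best with
            | none => pickB_loop rest (some (p, i))
            | some (pb, ib) =>
              if p < pb then pickB_loop rest (some (p, i))
              else pickB_loop rest (some (pb, ib))

def pick_form_id_alt (forms : List (List (String × String))) : Option String :=
  match forms with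
  | [] => none
  | f0 :: _ =>
    match pickB_loop forms none with
    | some (_, i) => some i
    | none => (PySem.Dict.mk f0).get? "id"

-- ===== PRECONDITION & SPEC =====
def Spec_pick_form_id (forms : List (List (String × String))) (out : Option String) : Prop := out = pick_form_id_alt forms
instance (forms : List (List (String × String))) (out : Option String) : Decidable (Spec_pick_form_id forms out) := by unfold Spec_pick_form_id; infer_instance

-- ===== CLAIM (what is proved, stated in full; the proofs are below) =====
def Claim_equal_pick_form_id : Prop := ∀ (forms : List (List (String × String))), Dom_pick_form_id forms → Spec_pick_form_id forms (pick_form_id forms)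

-- ===== LEMMAS AND PROOFS =====

-- (priority, id) score of a single form w.r.t. a preferred list ps
def scoreF (ps : List String) (f : List (String × String)) : Option (Nat × String) :=
  ((PySem.Dict.mk f).get? "id").bind fun i =>
    if i = "" then none
    else ((PySem.Dict.mk f).get? "type").bind fun t =>
      (PySem.List.index? ps t).map (fun k => (k, i))

-- keep the first argument unless the second has strictly smaller priority
def mrg : Option (Nat × String) → Option (Nat × String) → Option (Nat × String)
  | none, b => b
  | some a, none => some a
  | some a, some b => if b.1 < a.1 then some b else some a

def bestOf (ps : List String) : List (List (String × String)) → Option (Nat × String)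
  | [] => none
  | f :: rest => mrg (scoreF ps f) (bestOf ps rest)

theorem mrg_none_right (a : Option (Nat × String)) : mrg a none = a := by
  cases a <;> rfl

theorem mrg_assoc (a b c : Option (Nat × String)) :
    mrg (mrg a b) c = mrg a (mrg b c) := by
  cases a with
  | none => rfl
  | some qa =>
    cases b with
    | none => rfl
    | some qb =>
      cases c with
      | none => rw [mrg_none_right, mrg_none_right]
      | some qc =>
        by_cases h1 : qb.1 < qa.1 <;> by_cases h2 : qc.1 < qb.1 <;> by_cases h3 : qc.1 < qa.1 <;>
          simp [mrg, h1, h2, h3] <;> omega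

theorem mrg_map_succ (a b : Option (Nat × String)) :
    mrg (a.map (fun q => (q.1 + 1, q.2))) (b.map (fun q => (q.1 + 1, q.2)))
      = (mrg a b).map (fun q => (q.1 + 1, q.2)) := by
  cases a <;> cases b <;>
    simp only [Option.map_none, Option.map_some, mrg, add_lt_add_iff_right] <;>
    first | rfl | (split_ifs <;> rfl)

theorem score_nil (f : List (String × String)) : scoreF [] f = none := by
  simp only [scoreF]
  cases (PySem.Dict.mk f).get? "id" with
  | none => rfl
  | some i =>
    simp only [Option.bind_some]
    split_ifs
    · rfl
    · cases (PySem.Dict.mk f).get? "type" with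
      | none => rfl
      | some t => simp [PySem.List.index?_eq_idxOf?]

theorem bestOf_nil (forms : List (List (String × String))) : bestOf [] forms = none := by
  induction forms with
  | nil => rfl
  | cons f rest ih => simp only [bestOf, ih, mrg_none_right, score_nil]

theorem stepL (p : String) (ps : List String) (forms : List (List (String × String))) :
    bestOf (p :: ps) forms =
      (match pickA_inner p forms with
       | some i => some ((0 : Nat), i)
       | none => (bestOf ps forms).map (fun q => (q.1 + 1, q.2))) := by
  induction forms with
  | nil => rfl
  | cons f rest ih =>
    by_cases hc : (PySem.Dict.mk f).get? "type" = some p ∧ truthyA ((PySem.Dict.mk f).get? "id")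
    · -- f matches p: inner returns its id, score in (p::ps) is (0, id)
      obtain ⟨ht, hi⟩ := hc
      cases hid : (PySem.Dict.mk f).get? "id" with
      | none => simp [truthyA, hid] at hi
      | some i =>
        have hine : ¬ i = "" := by simp [truthyA, hid] at hi; exact fun h => hi (by simp [h])
        have hsc : scoreF (p :: ps) f = some (0, i) := by
          simp only [scoreF, hid, ht, Option.bind_some, if_neg hine,
            PySem.List.index?_cons_self, Option.map_some]
        have hinner : pickA_inner p (f :: rest) = some i := by
          simp [pickA_inner, ht, truthyA, hid, hine]
        rw [hinner]
        simp only [bestOf, hsc]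
        cases bestOf (p :: ps) rest <;> simp [mrg]
    · -- f does not match p
      have hinner : pickA_inner p (f :: rest) = pickA_inner p rest := by
        simp [pickA_inner, hc]
      have hsc : scoreF (p :: ps) f = (scoreF ps f).map (fun q => (q.1 + 1, q.2)) := by
        simp only [scoreF]
        cases hid : (PySem.Dict.mk f).get? "id" with
        | none => rfl
        | some i =>
          simp only [Option.bind_some]
          split_ifs with hie
          · rfl
          · cases hty : (PySem.Dict.mk f).get? "type" with
            | none => rfl
            | some t =>
              have htne : t ≠ p := by
                intro h; subst h
                exact hc ⟨hty, by simp [truthyA, hid, hie]⟩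
              simp only [Option.bind_some]
              rw [PySem.List.index?_cons_of_ne _ (Ne.symm htne)]
              cases PySem.List.index? ps t <;> rfl
      rw [hinner]
      simp only [bestOf, hsc, ih]
      cases hin : pickA_inner p rest with
      | some i =>
        cases scoreF ps f with
        | none => simp [mrg]
        | some q => simp [mrg]
      | none => simp only []; rw [mrg_map_succ]

theorem LA (ps : List String) (forms : List (List (String × String))) :
    pickA_outer forms ps = (bestOf ps forms).map (·.2) := by
  induction ps with
  | nil => simp [pickA_outer, bestOf_nil]
  | cons p ps ih =>
    simp only [pickA_outer, ih, stepL]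
    cases pickA_inner p forms with
    | some i => rfl
    | none => cases bestOf ps forms <;> rfl

theorem prio_get (t : String) :
    prioB.get? t = (PySem.List.index? preferredA t).map (fun k => ((k : Nat) : Int)) := by
  by_cases h1 : t = "drops"
  · subst h1; decide
  by_cases h2 : t = "syrup"
  · subst h2; decide
  by_cases h3 : t = "suspension"
  · subst h3; decide
  by_cases h4 : t = "solution"
  · subst h4; decide
  by_cases h5 : t = "tablet"
  · subst h5; decide
  by_cases h6 : t = "capsule"
  · subst h6; decide
  · have hn1 : "drops" ≠ t := Ne.symm h1
    have hn2 : "syrup" ≠ t := Ne.symm h2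
    have hn3 : "suspension" ≠ t := Ne.symm h3
    have hn4 : "solution" ≠ t := Ne.symm h4
    have hn5 : "tablet" ≠ t := Ne.symm h5
    have hn6 : "capsule" ≠ t := Ne.symm h6
    simp only [prioB, preferredA]
    rw [PySem.Dict.get?_mk_cons, PySem.Dict.get?_mk_cons, PySem.Dict.get?_mk_cons,
        PySem.Dict.get?_mk_cons, PySem.Dict.get?_mk_cons, PySem.Dict.get?_mk_cons]
    rw [PySem.List.index?_cons_of_ne _ hn1, PySem.List.index?_cons_of_ne _ hn2,
        PySem.List.index?_cons_of_ne _ hn3, PySem.List.index?_cons_of_ne _ hn4,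
        PySem.List.index?_cons_of_ne _ hn5, PySem.List.index?_cons_of_ne _ hn6]
    simp [hn1, hn2, hn3, hn4, hn5, hn6, PySem.List.index?_eq_idxOf?, PySem.Dict.get?]

def castP : Nat × String → Int × String := fun q => ((q.1 : Int), q.2)

theorem LB (forms : List (List (String × String))) (bN : Option (Nat × String)) :
    pickB_loop forms (bN.map castP) = (mrg bN (bestOf preferredA forms)).map castP := by
  induction forms generalizing bN with
  | nil => simp [pickB_loop, bestOf, mrg_none_right]
  | cons f rest ih =>
    have key : pickB_loop (f :: rest) (bN.map castP)
        = pickB_loop rest ((mrg bN (scoreF preferredA f)).map castP) := by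
      cases hid : (PySem.Dict.mk f).get? "id" with
      | none => simp [pickB_loop, scoreF, hid, mrg_none_right]
      | some i =>
        by_cases hie : i = ""
        · simp [pickB_loop, scoreF, hid, hie, mrg_none_right]
        · cases hty : (PySem.Dict.mk f).get? "type" with
          | none => simp [pickB_loop, scoreF, hid, hie, hty, mrg_none_right]
          | some t =>
            cases hidx : List.idxOf? t preferredA with
            | none => simp [pickB_loop, scoreF, hid, hie, hty, prio_get, PySem.List.index?_eq_idxOf?, hidx, mrg_none_right]
            | some k =>
              cases bN with
              | none => simp [pickB_loop, scoreF, hid, hie, hty, prio_get, PySem.List.index?_eq_idxOf?, hidx, mrg, castP]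
              | some q =>
                by_cases hlt : k < q.1
                · have hlt' : (k : Int) < (q.1 : Int) := by exact_mod_cast hlt
                  simp [pickB_loop, scoreF, hid, hie, hty, prio_get, PySem.List.index?_eq_idxOf?, hidx, mrg, castP, hlt, hlt']
                · have hlt' : ¬ (k : Int) < (q.1 : Int) := by exact_mod_cast hlt
                  simp [pickB_loop, scoreF, hid, hie, hty, prio_get, PySem.List.index?_eq_idxOf?, hidx, mrg, castP, hlt, hlt']
    rw [key, ih, bestOf, ← mrg_assoc]

-- ===== VERDICT (by name: the statement is the Claim_ definition above) =====
theorem pick_form_id_spec : Claim_equal_pick_form_id := by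
  intro forms _
  unfold Spec_pick_form_id
  cases forms with
  | nil => rfl
  | cons f0 rest =>
    simp only [pick_form_id, pick_form_id_alt, LA]
    have hB := LB (f0 :: rest) none
    simp only [Option.map_none, mrg] at hB
    rw [hB]
    cases bestOf preferredA (f0 :: rest) with
    | none => rfl
    | some q => rfl
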